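-- pv_equiv track=rewrite | github.com/smartdash-almasana/SmartPyme | app/adapters/telegram_adapter.py | _build_findings_message
-- ===== SOURCE A (Python) =====
-- from typing import Any
--
-- def _build_findings_message(findings: list[dict[str, Any]]) -> str:
--     counts: dict[str, int] = {}
--     for finding in findings:
--         code = str(finding.get("finding_type", "")).strip()
--         if not code:
--             continue
--         counts[code] = counts.get(code, 0) + 1
--     if not counts:
--         return "Archivo procesado. No se detectaron hallazgos operacionales."
--     lines = ["Hallazgos detectados:"]
--     for code in sorted(counts.keys()):
--         lines.append(f"- {code} ({counts[code]})")
--     return "\n".join(lines)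
-- ===== SOURCE B (Python) =====
-- def _build_findings_message(findings):
--     # Collect every non-blank stripped code, sort, then emit one line per run.
--     codes = []
--     for finding in findings:
--         code = str(finding.get("finding_type", "")).strip()
--         if code:
--             codes.append(code)
--     codes.sort()
--     if not codes:
--         return "Archivo procesado. No se detectaron hallazgos operacionales."
--     lines = ["Hallazgos detectados:"]
--     i = 0
--     n = len(codes)
--     while i < n:
--         j = i + 1
--         while j < n and codes[j] == codes[i]:
--             j += 1
--         lines.append(f"- {codes[i]} ({j - i})")
--         i = j
--     return "\n".join(lines)
-- ===== Notes on version B (the rewrite author's own statement) =====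
-- stated objective: alternative
-- what changed: Instead of building a dict of per-code counts and then iterating its sorted keys, B collects the non-blank stripped codes into a list, sorts it, and emits one line per run of equal codes in a single grouping pass.
import Mathlib
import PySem

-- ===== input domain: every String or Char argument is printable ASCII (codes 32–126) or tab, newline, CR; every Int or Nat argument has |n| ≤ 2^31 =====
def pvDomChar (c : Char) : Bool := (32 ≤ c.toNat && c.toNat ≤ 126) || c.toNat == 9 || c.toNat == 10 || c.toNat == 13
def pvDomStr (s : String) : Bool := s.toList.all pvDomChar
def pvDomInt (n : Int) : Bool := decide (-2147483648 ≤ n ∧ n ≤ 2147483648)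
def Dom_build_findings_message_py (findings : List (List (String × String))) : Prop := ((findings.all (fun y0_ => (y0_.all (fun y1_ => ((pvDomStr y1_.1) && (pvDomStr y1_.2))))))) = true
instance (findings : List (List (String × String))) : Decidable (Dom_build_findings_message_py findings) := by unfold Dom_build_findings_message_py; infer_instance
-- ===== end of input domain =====

-- B replaces A's dict-of-counts + sorted-keys loop by sort-then-group-runs (alternative algorithm, same cost).

-- ===== PORT A =====
def build_findings_message_py (findings : List (List (String × String))) : String :=
  -- counts = {}; for finding in findings: code = str(finding.get("finding_type","")).strip(); …
  -- (str(·) is the identity here: under the type convention the dict values are already strings)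
  let counts : PySem.Dict String Int := findings.foldl (fun counts finding =>
      let code := PySem.Str.strip ((PySem.Dict.mk finding).getD "finding_type" "")
      if code == "" then counts
      else counts.insert code (counts.getD code 0 + 1))
    PySem.Dict.empty
  if counts.size == 0 then
    "Archivo procesado. No se detectaron hallazgos operacionales."
  else
    -- counts[code]: code is drawn from counts' keys, so the key is always present and 0 is never used
    let lines := (PySem.List.sorted counts.keys (fun k => k) false).foldl
      (fun lines code => lines ++ ["- " ++ code ++ " (" ++ PySem.Int.toStr (counts.getD code 0) ++ ")"])
      ["Hallazgos detectados:"]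
    PySem.Str.join "\n" lines

-- ===== PORT B =====
-- the grouping pass of Source B: each outer-while step emits one line for the run of codes[i] at the
-- front of the remaining list (the inner while's j - i is the run length) and continues after the run
def pvRunLines (codes : List String) : List String :=
  match codes with
  | [] => []
  | c :: rest =>
      ("- " ++ c ++ " (" ++ PySem.Int.toStr (((rest.takeWhile (fun x => x == c)).length + 1 : Nat) : Int) ++ ")")
        :: pvRunLines (rest.dropWhile (fun x => x == c))
termination_by codes.length
decreasing_by
  have := List.length_dropWhile_le (fun x => x == c) rest
  simp only [List.length_cons]; omega

def build_findings_message_py_alt (findings : List (List (String × String))) : String :=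
  let codes : List String := findings.foldl (fun acc finding =>
      let code := PySem.Str.strip ((PySem.Dict.mk finding).getD "finding_type" "")
      if code == "" then acc else acc ++ [code]) []
  let codes := PySem.List.sorted codes (fun c => c) false
  if codes == ([] : List String) then
    "Archivo procesado. No se detectaron hallazgos operacionales."
  else
    PySem.Str.join "\n" ("Hallazgos detectados:" :: pvRunLines codes)

-- ===== PRECONDITION & SPEC =====
def Spec_build_findings_message_py (findings : List (List (String × String))) (out : String) : Prop := out = build_findings_message_py_alt findings
instance (findings : List (List (String × String))) (out : String) : Decidable (Spec_build_findings_message_py findings out) := by unfold Spec_build_findings_message_py; infer_instance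

-- ===== CLAIM (what is proved, stated in full; the proofs are below) =====
def Claim_equal_build_findings_message_py : Prop := ∀ (findings : List (List (String × String))), Dom_build_findings_message_py findings → Spec_build_findings_message_py findings (build_findings_message_py findings)

-- ===== LEMMAS AND PROOFS =====

-- the stripped non-blank codes, in input order
def pvCodes (findings : List (List (String × String))) : List String :=
  (findings.map (fun finding => PySem.Str.strip ((PySem.Dict.mk finding).getD "finding_type" ""))).filter
    (fun c => !(c == ""))

-- the first element of each run (pvRunLines' recursion skeleton)
def pvHeads (codes : List String) : List String :=
  match codes with
  | [] => []
  | c :: rest => c :: pvHeads (rest.dropWhile (fun x => x == c))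
termination_by codes.length
decreasing_by
  have := List.length_dropWhile_le (fun x => x == c) rest
  simp only [List.length_cons]; omega

lemma pvHeads_mem (xs : List String) (x : String) : x ∈ pvHeads xs ↔ x ∈ xs := by
  induction xs using pvHeads.induct with
  | case1 => simp [pvHeads]
  | case2 c rest ih =>
    rw [pvHeads]
    simp only [List.mem_cons, ih]
    constructor
    · rintro (rfl | h)
      · exact .inl rfl
      · exact .inr ((List.dropWhile_sublist _).mem h)
    · rintro (rfl | h)
      · exact .inl rfl
      · by_cases hx : x = c
        · exact .inl hx
        · right
          have hsplit := List.takeWhile_append_dropWhile (p := fun y => y == c) (l := rest)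
          rw [← hsplit] at h
          rcases List.mem_append.mp h with h1 | h2
          · exact absurd (by simpa using List.mem_takeWhile_imp h1) hx
          · exact h2

lemma pvHeads_pairwise_lt (xs : List String) (hs : xs.Pairwise (fun a b => a ≤ b)) :
    (pvHeads xs).Pairwise (fun a b => a < b) := by
  induction xs using pvHeads.induct with
  | case1 => simp [pvHeads]
  | case2 c rest ih =>
    rw [pvHeads]
    have hrest : rest.Pairwise (fun a b => a ≤ b) := (List.pairwise_cons.mp hs).2
    have hdrop : (rest.dropWhile (fun x => x == c)).Pairwise (fun a b => a ≤ b) :=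
      hrest.sublist (List.dropWhile_sublist _)
    refine List.pairwise_cons.mpr ⟨?_, ih hdrop⟩
    intro b hb
    have hbmem : b ∈ rest.dropWhile (fun x => x == c) := (pvHeads_mem _ _).mp hb
    have hle : c ≤ b := (List.pairwise_cons.mp hs).1 b ((List.dropWhile_sublist _).mem hbmem)
    rcases lt_or_eq_of_le hle with h | h
    · exact h
    · exfalso
      subst h
      cases hdw : rest.dropWhile (fun x => x == c) with
      | nil => rw [hdw] at hbmem; exact absurd hbmem (List.not_mem_nil)
      | cons d ds =>
        have hdne : (d == c) = false := by
          have := List.head_dropWhile_not (p := fun x => x == c) (l := rest)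
          simp only [hdw] at this
          simpa using this (by simp)
        rw [hdw] at hbmem hdrop
        rcases List.mem_cons.mp hbmem with rfl | hcs
        · simp at hdne
        · have hdc : d ≤ c := (List.pairwise_cons.mp hdrop).1 c hcs
          have hcd : c ≤ d := (List.pairwise_cons.mp hs).1 d
            ((List.dropWhile_sublist _).mem (by rw [hdw]; exact List.mem_cons_self))
          have : d = c := le_antisymm hdc hcd
          simp [this] at hdne

lemma pvRunLines_eq (xs : List String) (hs : xs.Pairwise (fun a b => a ≤ b)) :
    pvRunLines xs = (pvHeads xs).map
      (fun c => "- " ++ c ++ " (" ++ PySem.Int.toStr ((xs.count c : Nat) : Int) ++ ")") := by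
  induction xs using pvHeads.induct with
  | case1 => simp [pvRunLines, pvHeads]
  | case2 c rest ih =>
    rw [pvRunLines, pvHeads]
    have hpl := pvHeads_pairwise_lt (c :: rest) hs
    rw [pvHeads] at hpl
    have hdrop : (rest.dropWhile (fun x => x == c)).Pairwise (fun a b => a ≤ b) :=
      ((List.pairwise_cons.mp hs).2).sublist (List.dropWhile_sublist _)
    have hcnot : c ∉ rest.dropWhile (fun x => x == c) := by
      intro hc
      have := (List.pairwise_cons.mp hpl).1 c ((pvHeads_mem _ _).mpr hc)
      exact lt_irrefl _ this
    have hsplit := List.takeWhile_append_dropWhile (p := fun y => y == c) (l := rest)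
    simp only [List.map_cons, List.cons.injEq]
    constructor
    · have h1 : (c :: rest).count c = rest.count c + 1 := by simp
      have h2 : rest.count c = (rest.takeWhile (fun x => x == c)).length := by
        conv_lhs => rw [← hsplit]
        rw [List.count_append]
        have ht : (rest.takeWhile (fun x => x == c)).count c
            = (rest.takeWhile (fun x => x == c)).length := by
          apply List.count_eq_length.mpr
          intro a ha
          have := List.mem_takeWhile_imp ha
          exact (eq_of_beq this).symm
        have hd0 : (rest.dropWhile (fun x => x == c)).count c = 0 :=
          List.count_eq_zero.mpr hcnot
        omega
      rw [h1, h2]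
    · rw [ih hdrop]
      apply List.map_congr_left
      intro a ha
      have hamem : a ∈ rest.dropWhile (fun x => x == c) := (pvHeads_mem _ _).mp ha
      have hane : a ≠ c := by rintro rfl; exact hcnot hamem
      have : (c :: rest).count a = (rest.dropWhile (fun x => x == c)).count a := by
        rw [List.count_cons]
        conv_lhs => rw [← hsplit]
        rw [List.count_append]
        have ht0 : (rest.takeWhile (fun x => x == c)).count a = 0 := by
          apply List.count_eq_zero.mpr
          intro hmem
          exact hane (by simpa using List.mem_takeWhile_imp hmem)
        have hf : (c == a) = false := beq_eq_false_iff_ne.mpr (Ne.symm hane)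
        rw [ht0, hf]
        simp
      rw [this]

lemma pvCodesB_eq (findings : List (List (String × String))) :
    findings.foldl (fun acc finding =>
        let code := PySem.Str.strip ((PySem.Dict.mk finding).getD "finding_type" "")
        if code == "" then acc else acc ++ [code]) [] = pvCodes findings := by
  suffices h : (findings.map (fun finding => PySem.Str.strip ((PySem.Dict.mk finding).getD "finding_type" ""))).foldl
      (fun acc code => if code == "" then acc else acc ++ [code]) [] = pvCodes findings by
    rw [List.foldl_map] at h
    exact h
  have hc := PySem.List.foldl_congr_mem
    (l := findings.map (fun finding => PySem.Str.strip ((PySem.Dict.mk finding).getD "finding_type" "")))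
    (init := ([] : List String))
    (f := fun acc code => if code == "" then acc else acc ++ [code])
    (g := fun acc c => if !(c == "") then acc ++ [c] else acc)
    (by intro acc x _; by_cases h : x = "" <;> simp [h])
  rw [hc, PySem.List.foldl_append_if_eq_filter]
  rfl

lemma pvCounts_eq (findings : List (List (String × String))) :
    findings.foldl (fun counts finding =>
        let code := PySem.Str.strip ((PySem.Dict.mk finding).getD "finding_type" "")
        if code == "" then counts
        else counts.insert code (counts.getD code 0 + 1))
      PySem.Dict.empty = PySem.Dict.counter (pvCodes findings) := by
  suffices h : (findings.map (fun finding => PySem.Str.strip ((PySem.Dict.mk finding).getD "finding_type" ""))).foldl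
      (fun (counts : PySem.Dict String Int) code =>
        if code == "" then counts else counts.insert code (counts.getD code 0 + 1))
      PySem.Dict.empty = PySem.Dict.counter (pvCodes findings) by
    rw [List.foldl_map] at h
    exact h
  have hc := PySem.List.foldl_congr_mem
    (l := findings.map (fun finding => PySem.Str.strip ((PySem.Dict.mk finding).getD "finding_type" "")))
    (init := PySem.Dict.empty (κ := String) (ν := Int))
    (f := fun counts code => if code == "" then counts else counts.insert code (counts.getD code 0 + 1))
    (g := fun (d : PySem.Dict String Int) c => if !(c == "") then d.insert c (d.getD c 0 + 1) else d)
    (by intro acc x _; by_cases h : x = "" <;> simp [h])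
  rw [hc, PySem.List.foldl_if_eq_foldl_filter, PySem.Dict.foldl_insert_getD_add_one_eq_counter]
  rfl

lemma pvSortedHeads (codes : List String) :
    PySem.List.sorted (PySem.Set.ofList codes) (fun k => k) false
      = pvHeads (PySem.List.sorted codes (fun c => c) false) := by
  apply PySem.List.sorted_eq_of_perm_of_pairwise_lt
  · apply (List.perm_ext_iff_of_nodup ?_ ?_).mpr
    · intro x
      rw [pvHeads_mem, PySem.List.mem_sorted, PySem.Set.mem_ofList]
    · exact (pvHeads_pairwise_lt _ (PySem.List.sorted_pairwise (key := fun c => c) codes)).imp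
        ne_of_lt
    · exact PySem.Set.nodup_ofList codes
  · exact pvHeads_pairwise_lt _ (PySem.List.sorted_pairwise (key := fun c => c) codes)

lemma pvCounterSize (codes : List String) :
    (PySem.Dict.counter codes).size = (PySem.Set.ofList codes).length := by
  show (PySem.Dict.counter codes).items.length = _
  rw [PySem.Dict.items_counter, List.length_map]

-- ===== VERDICT (by name: the statement is the Claim_ definition above) =====
theorem build_findings_message_py_spec : Claim_equal_build_findings_message_py := by
  intro findings _hdom
  show build_findings_message_py findings = build_findings_message_py_alt findings
  rw [build_findings_message_py, build_findings_message_py_alt]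
  simp only [pvCounts_eq, pvCodesB_eq]
  by_cases hnil : pvCodes findings = []
  · simp [hnil, pvCounterSize, PySem.List.sorted_eq_nil_iff]
  · have h1 : (PySem.Dict.counter (pvCodes findings)).size ≠ 0 := by
      rw [pvCounterSize]
      cases h : pvCodes findings with
      | nil => exact absurd h hnil
      | cons c t =>
        intro hlen
        have : c ∈ PySem.Set.ofList (c :: t) := (PySem.Set.mem_ofList _ _).mpr List.mem_cons_self
        rw [List.length_eq_zero_iff.mp hlen] at this
        exact absurd this (List.not_mem_nil)
    have h2 : PySem.List.sorted (pvCodes findings) (fun c => c) false ≠ [] := by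
      intro hc
      exact hnil ((PySem.List.sorted_eq_nil_iff _ _ _).mp hc)
    simp only [beq_iff_eq, h1, h2, if_false]
    rw [PySem.List.foldl_append_singleton_eq_map]
    have hsortp : (PySem.List.sorted (pvCodes findings) (fun c => c) false).Pairwise
        (fun a b => a ≤ b) := PySem.List.sorted_pairwise (key := fun c => c) _
    rw [pvRunLines_eq _ hsortp]
    have hkeys : (PySem.Dict.counter (pvCodes findings)).keys = PySem.Set.ofList (pvCodes findings) :=
      PySem.Dict.keys_counter _
    rw [hkeys, pvSortedHeads]
    congr 1
    simp only [List.singleton_append, List.cons.injEq, true_and]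
    apply List.map_congr_left
    intro a _
    rw [PySem.Dict.getD_counter]
    rw [(PySem.List.sorted_perm (key := fun c => c) (rev := false) (xs := pvCodes findings)).count_eq]
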